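-- pv_equiv track=rewrite | github.com/AVoskoboinikov/ts | www/api/hug/helpers.py | isTrendMovingUp2
-- ===== SOURCE A (Python) =====
-- def isTrendMovingUp2(ticks):
-- 	sumUp = 0
-- 	sumDown = 0
--
-- 	for i in range(1, len(ticks)):
-- 		diff = ticks[i] - ticks[i-1]
--
-- 		if diff > 0:
-- 			sumUp += diff
--
-- 		if diff < 0:
-- 			sumDown += abs(diff)
--
-- 	return sumUp > sumDown
-- ===== SOURCE B (Python) =====
-- def isTrendMovingUp2(ticks):
--     # Telescoping: sum of positive diffs minus sum of negative diffs = last - first.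
--     return bool(ticks) and ticks[-1] > ticks[0]
-- ===== Notes on version B (the rewrite author's own statement) =====
-- stated objective: faster
-- what changed: Replaced the O(n) loop accumulating upward and downward moves by the telescoping closed form: sumUp - sumDown equals the last element minus the first, so B just compares the last element with the first.
import Mathlib
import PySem

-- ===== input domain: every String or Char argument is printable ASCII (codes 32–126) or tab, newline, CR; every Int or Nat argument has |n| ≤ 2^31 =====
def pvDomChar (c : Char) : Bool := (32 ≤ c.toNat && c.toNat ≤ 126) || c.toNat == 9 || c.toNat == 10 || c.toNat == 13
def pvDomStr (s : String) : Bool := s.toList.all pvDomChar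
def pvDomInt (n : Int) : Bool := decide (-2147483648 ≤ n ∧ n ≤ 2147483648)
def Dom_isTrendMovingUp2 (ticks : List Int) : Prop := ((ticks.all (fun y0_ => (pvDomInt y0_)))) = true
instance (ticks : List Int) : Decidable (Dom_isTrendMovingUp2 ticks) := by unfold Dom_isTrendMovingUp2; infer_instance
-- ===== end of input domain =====

-- B replaces A's O(n) accumulation of up/down moves by the O(1) telescoping comparison last > first.

-- ===== PORT A =====
-- loop body of A: diff = ticks[i] - ticks[i-1]; if diff > 0: sumUp += diff; if diff < 0: sumDown += abs(diff)
def pvLoopA (ticks : List Int) (s : Int × Int) (i : Int) : Int × Int :=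
  let diff := PySem.List.pyGetD ticks i 0 - PySem.List.pyGetD ticks (i - 1) 0
  let s1 := if diff > 0 then (s.1 + diff, s.2) else s
  if diff < 0 then (s1.1, s1.2 + |diff|) else s1

def isTrendMovingUp2 (ticks : List Int) : Bool :=
  let r := (PySem.List.pyRange 1 (ticks.length : Int) 1).foldl (pvLoopA ticks) (0, 0)
  decide (r.1 > r.2)

-- ===== PORT B =====
def isTrendMovingUp2_alt (ticks : List Int) : Bool :=
  match ticks with
  | [] => false
  | _ :: _ => decide (PySem.List.pyGetD ticks (-1) 0 > PySem.List.pyGetD ticks 0 0)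

-- ===== PRECONDITION & SPEC =====
def Spec_isTrendMovingUp2 (ticks : List Int) (out : Bool) : Prop := out = isTrendMovingUp2_alt ticks
instance (ticks : List Int) (out : Bool) : Decidable (Spec_isTrendMovingUp2 ticks out) := by unfold Spec_isTrendMovingUp2; infer_instance

-- ===== CLAIM (what is proved, stated in full; the proofs are below) =====
def Claim_equal_isTrendMovingUp2 : Prop := ∀ (ticks : List Int), Dom_isTrendMovingUp2 ticks → Spec_isTrendMovingUp2 ticks (isTrendMovingUp2 ticks)

-- ===== LEMMAS AND PROOFS =====

lemma pvLoopA_delta (t : List Int) (s : Int × Int) (i : Int) :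
    (pvLoopA t s i).1 - (pvLoopA t s i).2
      = s.1 - s.2 + (PySem.List.pyGetD t i 0 - PySem.List.pyGetD t (i - 1) 0) := by
  simp only [pvLoopA]
  set d := PySem.List.pyGetD t i 0 - PySem.List.pyGetD t (i - 1) 0 with hd
  split_ifs with h1 h2 h2
  all_goals try omega
  all_goals rw [abs_of_neg (by omega)]; omega

-- the telescoping invariant of A's loop: sumUp - sumDown = last - first
lemma pvTele : ∀ (xs : List Int),
    ((PySem.List.pyRange 1 (xs.length : Int) 1).foldl (pvLoopA xs) (0, 0)).1
      - ((PySem.List.pyRange 1 (xs.length : Int) 1).foldl (pvLoopA xs) (0, 0)).2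
      = PySem.List.pyGetD xs (-1) 0 - PySem.List.pyGetD xs 0 0 := by
  intro xs
  induction xs using List.reverseRecOn with
  | nil => simp [PySem.List.pyRange_one_eq_nil, PySem.List.pyGetD, PySem.List.pyGet?,
      PySem.List.pyIdx?]
  | append_singleton ys x ih =>
    rcases ys with _ | ⟨y, ys'⟩
    · simp [PySem.List.pyRange_one_eq_nil, PySem.List.pyGetD, PySem.List.pyGet?,
        PySem.List.pyIdx?]
    · set xs := y :: ys' with hxs
      have hne : xs ≠ [] := by simp [hxs]
      have hlen : (((xs ++ [x]).length : Int)) = (xs.length : Int) + 1 := by simp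
      have h1n : (1 : Int) ≤ (xs.length : Int) := by simp [hxs]
      rw [hlen, PySem.List.pyRange_one_succ_right h1n, List.foldl_append]
      have hcongr :
          (PySem.List.pyRange 1 (xs.length : Int) 1).foldl (pvLoopA (xs ++ [x])) ((0,0) : Int × Int)
            = (PySem.List.pyRange 1 (xs.length : Int) 1).foldl (pvLoopA xs) (0,0) := by
        apply PySem.List.foldl_congr_mem
        intro acc i hi
        rw [PySem.List.mem_pyRange_one] at hi
        have e1 : PySem.List.pyGetD (xs ++ [x]) i 0 = PySem.List.pyGetD xs i 0 := by
          rw [PySem.List.pyGetD_eq_getElem (xs ++ [x]) 0 (by omega) (by rw [hlen]; omega),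
              PySem.List.pyGetD_eq_getElem xs 0 (by omega) (by omega)]
          exact List.getElem_append_left (by omega)
        have e2 : PySem.List.pyGetD (xs ++ [x]) (i - 1) 0 = PySem.List.pyGetD xs (i - 1) 0 := by
          rw [PySem.List.pyGetD_eq_getElem (xs ++ [x]) 0 (by omega) (by rw [hlen]; omega),
              PySem.List.pyGetD_eq_getElem xs 0 (by omega) (by omega)]
          exact List.getElem_append_left (by omega)
        simp only [pvLoopA, e1, e2]
      rw [hcongr]
      simp only [List.foldl_cons, List.foldl_nil]
      rw [pvLoopA_delta, ih]
      have eL : PySem.List.pyGetD (xs ++ [x]) ((xs.length : Int)) 0 = x := by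
        rw [PySem.List.pyGetD_eq_getElem (xs ++ [x]) 0 (by omega) (by rw [hlen]; omega)]
        simp
      have hidx : (((xs.length : Int)) - 1).toNat = xs.length - 1 := by omega
      have eP : PySem.List.pyGetD (xs ++ [x]) ((xs.length : Int) - 1) 0
          = PySem.List.pyGetD xs (-1) 0 := by
        rw [PySem.List.pyGetD_eq_getElem (xs ++ [x]) 0 (by omega) (by rw [hlen]; omega),
            PySem.List.pyGetD_neg_one xs 0 hne, List.getLast_eq_getElem]
        rw [List.getElem_append_left (by omega)]
        simp [hidx]
      have e0 : PySem.List.pyGetD (xs ++ [x]) 0 0 = PySem.List.pyGetD xs 0 0 := by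
        simp [hxs, PySem.List.pyGetD_zero_cons]
      have eN1 : PySem.List.pyGetD (xs ++ [x]) (-1) 0 = x :=
        PySem.List.pyGetD_neg_one_append_singleton xs x 0
      rw [eL, eP, e0, eN1]
      ring

-- ===== VERDICT (by name: the statement is the Claim_ definition above) =====
theorem isTrendMovingUp2_spec : Claim_equal_isTrendMovingUp2 := by
  intro ticks _
  unfold Spec_isTrendMovingUp2 isTrendMovingUp2 isTrendMovingUp2_alt
  rcases ticks with _ | ⟨y, ys⟩
  · simp [PySem.List.pyRange_one_eq_nil]
  · have h := pvTele (y :: ys)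
    simp only []
    rw [decide_eq_decide]
    constructor <;> intro <;> omega
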